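-- pv_equiv track=rewrite | github.com/surmayi/GrokkingCoding | TwoPointers.py | minSubArrayWindowToMaketheWholeArraySorted
-- ===== SOURCE A (Python) =====
-- def minSubArrayWindowToMaketheWholeArraySorted(arr):
--     winStart, winEnd = 0, len(arr)-1
--     while winStart<winEnd and arr[winStart]<arr[winStart+1]:
--         winStart+=1
--     if winStart==winEnd:
--         return 0
--     while winEnd>0 and arr[winEnd]>arr[winEnd-1]:
--         winEnd-=1
--     minEle, maxEle = float('inf'), float('-inf')
--     for i in range(winStart,winEnd+1):
--         minEle = min(minEle,arr[i])
--         maxEle = max(maxEle,arr[i])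
--
--     while winStart>=0 and arr[winStart]>minEle:
--         winStart-=1
--     while winEnd<len(arr) and arr[winEnd]<maxEle:
--         winEnd+=1
--
--     return winEnd-winStart-1
-- ===== SOURCE B (Python) =====
-- def minSubArrayWindowToMaketheWholeArraySorted(arr):
--     n = len(arr)
--     # positions where the array fails to be strictly ascending
--     desc = [i for i in range(n - 1) if arr[i] >= arr[i + 1]]
--     if not desc:
--         return 0
--     p, q = desc[0], desc[-1] + 1
--     window = arr[p:q + 1]
--     m, M = min(window), max(window)
--     left = sum(1 for x in arr[:p + 1] if x <= m)
--     right = q + sum(1 for x in arr[q:] if x < M)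
--     return right - left
-- ===== Notes on version B (the rewrite author's own statement) =====
-- stated objective: alternative
-- what changed: A's four sequential pointer scans (walk in from each end, min/max loop with float-inf sentinels, then walk back out) are replaced by a declarative formulation: collect the non-ascent positions once, take the first and last as the core window, and obtain the final boundaries by counting prefix elements <= the window minimum and suffix elements < the window maximum.
-- outside the precondition, e.g. on minSubArrayWindowToMaketheWholeArraySorted([]): A raises IndexError, B returns 0
-- crash fix: On the empty list A raises IndexError (arr[winStart] with winStart=0 on []), while B returns 0, the natural answer for an already-sorted (empty) array. — e.g. on minSubArrayWindowToMaketheWholeArraySorted([]): A raises IndexError, B returns 0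
import Mathlib
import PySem

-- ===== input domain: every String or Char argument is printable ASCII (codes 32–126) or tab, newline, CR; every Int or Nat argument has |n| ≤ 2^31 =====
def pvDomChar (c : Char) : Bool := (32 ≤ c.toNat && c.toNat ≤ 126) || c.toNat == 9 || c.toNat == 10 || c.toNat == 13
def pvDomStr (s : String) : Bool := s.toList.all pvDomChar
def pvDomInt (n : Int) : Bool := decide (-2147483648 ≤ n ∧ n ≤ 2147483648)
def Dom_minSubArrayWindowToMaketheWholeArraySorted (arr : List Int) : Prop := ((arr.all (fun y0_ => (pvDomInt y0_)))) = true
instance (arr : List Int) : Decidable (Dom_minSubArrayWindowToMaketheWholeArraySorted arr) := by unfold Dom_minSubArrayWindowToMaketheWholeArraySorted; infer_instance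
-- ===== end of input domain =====

-- B replaces A's four sequential pointer scans by a declarative formulation (collect the non-ascent
-- positions once, then count boundary elements against the window min/max); alternative decomposition,
-- same values; the equivalence is about the return value only (neither program mutates its argument).

-- ===== PORT A =====
-- arr[i] is ported as pyGetD (all accesses are in range under Pre_; on [] Python raises IndexError, excluded by Pre_).
-- float('inf') / float('-inf') sentinels are ported as `none` in an Option Int:
-- gtOptA x m? is Python's  x > minEle  (false when minEle is +inf), ltOptA x M? is  x < maxEle  (false when maxEle is -inf).

def gtOptA (x : Int) : Option Int → Bool
  | none => false
  | some m => decide (m < x)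

def ltOptA (x : Int) : Option Int → Bool
  | none => false
  | some m => decide (x < m)

def minOptA : Option Int → Int → Option Int
  | none, x => some x
  | some m, x => some (min m x)

def maxOptA : Option Int → Int → Option Int
  | none, x => some x
  | some m, x => some (max m x)

-- while winStart<winEnd and arr[winStart]<arr[winStart+1]: winStart+=1
def ascendA (arr : List Int) (winEnd winStart : Int) : Int :=
  if h : winStart < winEnd ∧ PySem.List.pyGetD arr winStart 0 < PySem.List.pyGetD arr (winStart + 1) 0 then
    ascendA arr winEnd (winStart + 1)
  else winStart
termination_by (winEnd - winStart).toNat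
decreasing_by omega

-- while winEnd>0 and arr[winEnd]>arr[winEnd-1]: winEnd-=1
def descendA (arr : List Int) (winEnd : Int) : Int :=
  if h : 0 < winEnd ∧ PySem.List.pyGetD arr winEnd 0 > PySem.List.pyGetD arr (winEnd - 1) 0 then
    descendA arr (winEnd - 1)
  else winEnd
termination_by winEnd.toNat
decreasing_by omega

-- while winStart>=0 and arr[winStart]>minEle: winStart-=1
def expandLeftA (arr : List Int) (minEle : Option Int) (winStart : Int) : Int :=
  if h : 0 ≤ winStart ∧ gtOptA (PySem.List.pyGetD arr winStart 0) minEle = true then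
    expandLeftA arr minEle (winStart - 1)
  else winStart
termination_by (winStart + 1).toNat
decreasing_by omega

-- while winEnd<len(arr) and arr[winEnd]<maxEle: winEnd+=1
def expandRightA (arr : List Int) (maxEle : Option Int) (winEnd : Int) : Int :=
  if h : winEnd < (arr.length : Int) ∧ ltOptA (PySem.List.pyGetD arr winEnd 0) maxEle = true then
    expandRightA arr maxEle (winEnd + 1)
  else winEnd
termination_by ((arr.length : Int) - winEnd).toNat
decreasing_by omega

def minSubArrayWindowToMaketheWholeArraySorted (arr : List Int) : Int :=
  let winEnd0 : Int := (arr.length : Int) - 1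
  let winStart1 := ascendA arr winEnd0 0
  if winStart1 = winEnd0 then 0
  else
    let winEnd1 := descendA arr winEnd0
    let mm := (PySem.List.pyRange winStart1 (winEnd1 + 1)).foldl
        (fun s i => (minOptA s.1 (PySem.List.pyGetD arr i 0), maxOptA s.2 (PySem.List.pyGetD arr i 0)))
        (none, none)
    let winStart2 := expandLeftA arr mm.1 winStart1
    let winEnd2 := expandRightA arr mm.2 winEnd1
    winEnd2 - winStart2 - 1


-- ===== PORT B =====
def minSubArrayWindowToMaketheWholeArraySorted_alt (arr : List Int) : Int :=
  let n : Int := arr.length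
  -- desc = [i for i in range(n - 1) if arr[i] >= arr[i + 1]]
  let desc := (PySem.List.pyRange 0 (n - 1)).filter
      (fun i => decide (PySem.List.pyGetD arr i 0 ≥ PySem.List.pyGetD arr (i + 1) 0))
  if desc = [] then 0
  else
    let p := PySem.List.pyGetD desc 0 0
    let q := PySem.List.pyGetD desc (-1) 0 + 1
    let window := PySem.List.slice arr (some p) (some (q + 1))
    -- min/max of the nonempty list `window` (Python's min/max raise only on an empty list, never reached here)
    let m := (PySem.List.min? window (fun x => x)).getD 0
    let M := (PySem.List.max? window (fun x => x)).getD 0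
    let left : Int := ((PySem.List.slice arr none (some (p + 1))).countP (fun x => decide (x ≤ m)) : Nat)
    let right : Int := q + ((PySem.List.slice arr (some q) none).countP (fun x => decide (x < M)) : Nat)
    right - left

-- ===== PRECONDITION & SPEC =====
-- Pre_ excludes only the empty list, on which A raises IndexError.
def Pre_minSubArrayWindowToMaketheWholeArraySorted (arr : List Int) : Prop := arr ≠ []
instance (arr : List Int) : Decidable (Pre_minSubArrayWindowToMaketheWholeArraySorted arr) := by
  unfold Pre_minSubArrayWindowToMaketheWholeArraySorted; infer_instance

def pvWitness_minSubArrayWindowToMaketheWholeArraySorted : List Int := [1, 3, 2, 2]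

-- On the empty list A raises IndexError (it evaluates arr[winStart] with winStart = 0), while B returns 0,
-- the natural answer for an already-sorted (empty) array.
def Raises_minSubArrayWindowToMaketheWholeArraySorted (arr : List Int) : Prop := arr = []
instance (arr : List Int) : Decidable (Raises_minSubArrayWindowToMaketheWholeArraySorted arr) := by
  unfold Raises_minSubArrayWindowToMaketheWholeArraySorted; infer_instance
def pvRaiseWitness_minSubArrayWindowToMaketheWholeArraySorted : List Int := []
def pvRaiseWitnessOut_minSubArrayWindowToMaketheWholeArraySorted : Int := 0

def Spec_minSubArrayWindowToMaketheWholeArraySorted (arr : List Int) (out : Int) : Prop := out = minSubArrayWindowToMaketheWholeArraySorted_alt arr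
instance (arr : List Int) (out : Int) : Decidable (Spec_minSubArrayWindowToMaketheWholeArraySorted arr out) := by unfold Spec_minSubArrayWindowToMaketheWholeArraySorted; infer_instance

-- ===== CLAIM (what is proved, stated in full; the proofs are below) =====
def Claim_equal_minSubArrayWindowToMaketheWholeArraySorted : Prop := ∀ (arr : List Int), Dom_minSubArrayWindowToMaketheWholeArraySorted arr → Pre_minSubArrayWindowToMaketheWholeArraySorted arr → Spec_minSubArrayWindowToMaketheWholeArraySorted arr (minSubArrayWindowToMaketheWholeArraySorted arr)

def Claim_raises_minSubArrayWindowToMaketheWholeArraySorted : Prop := (∀ (arr : List Int), Dom_minSubArrayWindowToMaketheWholeArraySorted arr → Raises_minSubArrayWindowToMaketheWholeArraySorted arr → ¬ Pre_minSubArrayWindowToMaketheWholeArraySorted arr) ∧ (Dom_minSubArrayWindowToMaketheWholeArraySorted (pvRaiseWitness_minSubArrayWindowToMaketheWholeArraySorted) ∧ Raises_minSubArrayWindowToMaketheWholeArraySorted (pvRaiseWitness_minSubArrayWindowToMaketheWholeArraySorted) ∧ minSubArrayWindowToMaketheWholeArraySorted_alt (pvRaiseWitness_minSubArrayWindowToMaketheWholeArraySorted)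 = pvRaiseWitnessOut_minSubArrayWindowToMaketheWholeArraySorted)

-- ===== LEMMAS AND PROOFS =====

def G (arr : List Int) (i : Nat) : Int := arr.getD i 0

theorem pg_eq (arr : List Int) (w : Int) (hw : 0 ≤ w) :
    PySem.List.pyGetD arr w 0 = G arr w.toNat := PySem.List.pyGetD_of_nonneg arr 0 hw

theorem ascend_spec (arr : List Int) (ws : Int) (h0 : 0 ≤ ws) (hub : ws ≤ (arr.length : Int) - 1)
    (hpre : ∀ i : Nat, (i : Int) + 1 ≤ ws → G arr i < G arr (i + 1)) :
    0 ≤ ascendA arr ((arr.length : Int) - 1) ws ∧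
    ws ≤ ascendA arr ((arr.length : Int) - 1) ws ∧
    ascendA arr ((arr.length : Int) - 1) ws ≤ (arr.length : Int) - 1 ∧
    (∀ i : Nat, (i : Int) + 1 ≤ ascendA arr ((arr.length : Int) - 1) ws → G arr i < G arr (i + 1)) ∧
    (ascendA arr ((arr.length : Int) - 1) ws = (arr.length : Int) - 1 ∨
      G arr ((ascendA arr ((arr.length : Int) - 1) ws).toNat + 1) ≤ G arr (ascendA arr ((arr.length : Int) - 1) ws).toNat) := by
  by_cases h : ws < (arr.length : Int) - 1 ∧ PySem.List.pyGetD arr ws 0 < PySem.List.pyGetD arr (ws + 1) 0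
  · rw [ascendA, dif_pos h]
    have hstep : G arr ws.toNat < G arr (ws.toNat + 1) := by
      have e1 := pg_eq arr ws h0
      have e2 := pg_eq arr (ws + 1) (by omega)
      have e3 : (ws + 1).toNat = ws.toNat + 1 := by omega
      rw [e1, e2, e3] at h
      exact h.2
    have ih := ascend_spec arr (ws + 1) (by omega) (by omega) (by
      intro i hi
      rcases lt_or_eq_of_le hi with hlt | heq
      · exact hpre i (by omega)
      · have : i = ws.toNat := by omega
        rw [this]; exact hstep)
    exact ⟨by omega, by omega, ih.2.2.1, ih.2.2.2.1, ih.2.2.2.2⟩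
  · rw [ascendA, dif_neg h]
    push_neg at h
    refine ⟨h0, le_refl ws, hub, hpre, ?_⟩
    rcases eq_or_lt_of_le hub with heq | hlt
    · exact Or.inl heq
    · refine Or.inr ?_
      have hng := h hlt
      have e1 := pg_eq arr ws h0
      have e2 := pg_eq arr (ws + 1) (by omega)
      have e3 : (ws + 1).toNat = ws.toNat + 1 := by omega
      rw [e1, e2, e3] at hng
      omega
termination_by ((arr.length : Int) - 1 - ws).toNat
decreasing_by omega

theorem descend_spec (arr : List Int) (we : Int) (h0 : 0 ≤ we) (hub : we ≤ (arr.length : Int) - 1)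
    (hpost : ∀ j : Nat, we + 1 ≤ (j : Int) → (j : Int) ≤ (arr.length : Int) - 1 → G arr (j - 1) < G arr j) :
    0 ≤ descendA arr we ∧
    descendA arr we ≤ we ∧
    (∀ j : Nat, descendA arr we + 1 ≤ (j : Int) → (j : Int) ≤ (arr.length : Int) - 1 → G arr (j - 1) < G arr j) ∧
    (descendA arr we = 0 ∨ G arr (descendA arr we).toNat ≤ G arr ((descendA arr we).toNat - 1)) := by
  by_cases h : 0 < we ∧ PySem.List.pyGetD arr we 0 > PySem.List.pyGetD arr (we - 1) 0
  · rw [descendA, dif_pos h]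
    have hstep : G arr (we.toNat - 1) < G arr we.toNat := by
      have e1 := pg_eq arr we h0
      have e2 := pg_eq arr (we - 1) (by omega)
      have e3 : (we - 1).toNat = we.toNat - 1 := by omega
      rw [e1, e2, e3] at h
      exact h.2
    have ih := descend_spec arr (we - 1) (by omega) (by omega) (by
      intro j hj1 hj2
      rcases lt_or_eq_of_le hj1 with hlt | heq
      · exact hpost j (by omega) hj2
      · have : j = we.toNat := by omega
        rw [this]; exact hstep)
    exact ⟨ih.1, by omega, ih.2.2.1, ih.2.2.2⟩
  · rw [descendA, dif_neg h]
    push_neg at h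
    refine ⟨h0, le_refl we, hpost, ?_⟩
    rcases eq_or_lt_of_le h0 with heq | hlt
    · exact Or.inl heq.symm
    · refine Or.inr ?_
      have hng := h hlt
      have e1 := pg_eq arr we (by omega)
      have e2 := pg_eq arr (we - 1) (by omega)
      have e3 : (we - 1).toNat = we.toNat - 1 := by omega
      rw [e1, e2, e3] at hng
      omega
termination_by we.toNat
decreasing_by omega

theorem descend_ge (arr : List Int) (p : Nat) (hp : G arr (p + 1) ≤ G arr p)
    (we : Int) (hwe : (p : Int) + 1 ≤ we) : (p : Int) + 1 ≤ descendA arr we := by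
  by_cases h : 0 < we ∧ PySem.List.pyGetD arr we 0 > PySem.List.pyGetD arr (we - 1) 0
  · rw [descendA, dif_pos h]
    rcases lt_or_eq_of_le hwe with hlt | heq
    · exact descend_ge arr p hp (we - 1) (by omega)
    · exfalso
      have e1 := pg_eq arr we (by omega)
      have e2 := pg_eq arr (we - 1) (by omega)
      rw [e1, e2] at h
      have h1 : we.toNat = p + 1 := by omega
      have h2 : (we - 1).toNat = p := by omega
      rw [h1, h2] at h
      omega
  · rw [descendA, dif_neg h]
    exact hwe
termination_by we.toNat
decreasing_by omega

theorem expandLeft_spec (arr : List Int) (m : Int) (ws : Int) (h0 : -1 ≤ ws) :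
    -1 ≤ expandLeftA arr (some m) ws ∧
    expandLeftA arr (some m) ws ≤ ws ∧
    (∀ i : Nat, expandLeftA arr (some m) ws + 1 ≤ (i : Int) → (i : Int) ≤ ws → m < G arr i) ∧
    (expandLeftA arr (some m) ws = -1 ∨ G arr (expandLeftA arr (some m) ws).toNat ≤ m) := by
  by_cases h : 0 ≤ ws ∧ gtOptA (PySem.List.pyGetD arr ws 0) (some m) = true
  · rw [expandLeftA, dif_pos h]
    have hstep : m < G arr ws.toNat := by
      have e1 := pg_eq arr ws h.1
      have h2 := h.2
      simp only [gtOptA, decide_eq_true_eq] at h2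
      rw [e1] at h2
      exact h2
    have ih := expandLeft_spec arr m (ws - 1) (by omega)
    refine ⟨ih.1, by omega, ?_, ih.2.2.2⟩
    intro i hi1 hi2
    rcases lt_or_eq_of_le hi2 with hlt | heq
    · exact ih.2.2.1 i hi1 (by omega)
    · have : i = ws.toNat := by omega
      rw [this]; exact hstep
  · rw [expandLeftA, dif_neg h]
    push_neg at h
    refine ⟨h0, le_refl ws, by intro i h1 h2; omega, ?_⟩
    by_cases hpos : 0 ≤ ws
    · refine Or.inr ?_
      have hng := h hpos
      simp [gtOptA] at hng
      rw [pg_eq arr ws hpos] at hng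
      omega
    · exact Or.inl (by omega)
termination_by (ws + 1).toNat
decreasing_by omega

theorem expandRight_spec (arr : List Int) (M : Int) (we : Int) (h0 : 0 ≤ we) (hub : we ≤ (arr.length : Int)) :
    we ≤ expandRightA arr (some M) we ∧
    expandRightA arr (some M) we ≤ (arr.length : Int) ∧
    (∀ j : Nat, we ≤ (j : Int) → (j : Int) + 1 ≤ expandRightA arr (some M) we → G arr j < M) ∧
    (expandRightA arr (some M) we = (arr.length : Int) ∨ M ≤ G arr (expandRightA arr (some M) we).toNat) := by
  by_cases h : we < (arr.length : Int) ∧ ltOptA (PySem.List.pyGetD arr we 0) (some M) = true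
  · rw [expandRightA, dif_pos h]
    have hstep : G arr we.toNat < M := by
      have h2 := h.2
      simp only [ltOptA, decide_eq_true_eq] at h2
      rw [pg_eq arr we h0] at h2
      exact h2
    have ih := expandRight_spec arr M (we + 1) (by omega) (by omega)
    refine ⟨by omega, ih.2.1, ?_, ih.2.2.2⟩
    intro j hj1 hj2
    rcases lt_or_eq_of_le hj1 with hlt | heq
    · exact ih.2.2.1 j (by omega) hj2
    · have : j = we.toNat := by omega
      rw [this]; exact hstep
  · rw [expandRightA, dif_neg h]
    push_neg at h
    refine ⟨le_refl we, hub, by intro j h1 h2; omega, ?_⟩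
    rcases eq_or_lt_of_le hub with heq | hlt
    · exact Or.inl heq
    · refine Or.inr ?_
      have hng := h hlt
      simp [ltOptA] at hng
      rw [pg_eq arr we h0] at hng
      omega
termination_by ((arr.length : Int) - we).toNat
decreasing_by omega

theorem chain_mono (arr : List Int) (a b : Nat)
    (hadj : ∀ i : Nat, a ≤ i → i + 1 ≤ b → G arr i < G arr (i + 1)) :
    ∀ i j : Nat, a ≤ i → i ≤ j → j ≤ b → G arr i ≤ G arr j := by
  intro i j hai
  induction j with
  | zero =>
    intro hij _
    have hi0 : i = 0 := by omega
    simp [hi0]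
  | succ j ih =>
    intro hij hjb
    rcases Nat.lt_or_ge i (j + 1) with h | h
    · have h1 : G arr i ≤ G arr j := ih (by omega) (by omega)
      have h2 : G arr j < G arr (j + 1) := hadj j (by omega) (by omega)
      omega
    · have hi : i = j + 1 := by omega
      simp [hi]


theorem countP_range_init (mN t : Nat) (p : Nat → Bool) (ht : t ≤ mN)
    (hiff : ∀ i : Nat, i < mN → (p i = true ↔ i < t)) :
    (List.range mN).countP p = t := by
  have hsplit : mN = t + (mN - t) := by omega
  rw [hsplit, List.range_add, List.countP_append]
  have h1 : (List.range t).countP p = t := by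
    have hall : ∀ a ∈ List.range t, p a = true := by
      intro a ha
      simp only [List.mem_range] at ha
      exact (hiff a (by omega)).mpr ha
    have := List.countP_eq_length.mpr hall
    simpa using this
  have h2 : ((List.range (mN - t)).map (fun x => t + x)).countP p = 0 := by
    rw [List.countP_map]
    exact List.countP_eq_zero.mpr (by
      intro a ha
      simp only [List.mem_range] at ha
      simp only [Function.comp]
      intro hp
      have := (hiff (t + a) (by omega)).mp hp
      omega)
  omega

theorem drop_take_eq_map_range (arr : List Int) :
    ∀ (k j : Nat), j + k ≤ arr.length →
      (arr.drop j).take k = (List.range k).map (fun i => G arr (j + i)) := by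
  intro k
  induction k with
  | zero => intro j _; simp
  | succ k ih =>
    intro j h
    rw [List.range_succ, List.map_append, List.take_succ, ih j (by omega)]
    have : (arr.drop j)[k]? = some (arr.getD (j + k) 0) := by
      rw [List.getElem?_drop]
      rw [List.getD_eq_getElem arr 0 (by omega)]
      exact List.getElem?_eq_getElem (by omega)
    simp [this, G]

theorem map_pyRange_window (arr : List Int) (j k : Nat) :
    (PySem.List.pyRange (j : Int) ((j : Int) + (k : Int))).map (fun i => PySem.List.pyGetD arr i 0)
      = (List.range k).map (fun i => G arr (j + i)) := by
  rw [PySem.List.pyRange_one, List.map_map]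
  have hk : ((j : Int) + (k : Int) - (j : Int)).toNat = k := by omega
  rw [hk]
  apply List.map_congr_left
  intro t _
  simp only [Function.comp]
  have : (j : Int) + (t : Int) = ((j + t : Nat) : Int) := by push_cast; ring
  rw [this, PySem.List.pyGetD_natCast]
  rfl

theorem minOpt_go (t : List Int) (a : Int) : t.foldl minOptA (some a) = some (t.foldl min a) := by
  induction t generalizing a with
  | nil => rfl
  | cons y ys ih => simp only [List.foldl_cons, minOptA]; exact ih (min a y)

theorem maxOpt_go (t : List Int) (a : Int) : t.foldl maxOptA (some a) = some (t.foldl max a) := by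
  induction t generalizing a with
  | nil => rfl
  | cons y ys ih => simp only [List.foldl_cons, maxOptA]; exact ih (max a y)

theorem main_eq (arr : List Int) (hne : arr ≠ []) :
    minSubArrayWindowToMaketheWholeArraySorted arr = minSubArrayWindowToMaketheWholeArraySorted_alt arr := by
  have hn1 : 1 ≤ arr.length := List.length_pos_iff.mpr hne
  simp only [minSubArrayWindowToMaketheWholeArraySorted, minSubArrayWindowToMaketheWholeArraySorted_alt]
  have hA0 := ascend_spec arr 0 (le_refl 0) (by omega) (by intro i hi; exact absurd hi (by omega))
  set P := ascendA arr ((arr.length : Int) - 1) 0 with hPdef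
  obtain ⟨hP0, -, hPub, hPasc, hPstop⟩ := hA0
  by_cases hP : P = (arr.length : Int) - 1
  · -- whole array strictly ascending: both sides 0
    have hdesc : (PySem.List.pyRange 0 ((arr.length : Int) - 1)).filter
        (fun i => decide (PySem.List.pyGetD arr i 0 ≥ PySem.List.pyGetD arr (i + 1) 0)) = [] := by
      apply List.filter_eq_nil_iff.mpr
      intro a ha
      rw [PySem.List.mem_pyRange_one] at ha
      have e1 := pg_eq arr a ha.1
      have e2 := pg_eq arr (a + 1) (by omega)
      have e3 : (a + 1).toNat = a.toNat + 1 := by omega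
      have hlt : G arr a.toNat < G arr (a.toNat + 1) := hPasc a.toNat (by omega)
      rw [e1, e2, e3]
      simp only [ge_iff_le, decide_eq_true_eq]
      omega
    rw [if_pos hP, hdesc, if_pos rfl]
  · -- a genuine window
    have hPlt : P < (arr.length : Int) - 1 := lt_of_le_of_ne hPub hP
    have hPTstop : G arr (P.toNat + 1) ≤ G arr P.toNat := hPstop.resolve_left hP
    have hD0 := descend_spec arr ((arr.length : Int) - 1) (by omega) (le_refl _)
      (by intro j hj1 hj2; exact absurd hj1 (by omega))
    set Q := descendA arr ((arr.length : Int) - 1) with hQdef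
    obtain ⟨hQ0, hQub, hQasc, hQstop⟩ := hD0
    have hPQ : P + 1 ≤ Q := by
      have h := descend_ge arr P.toNat hPTstop ((arr.length : Int) - 1) (by omega)
      omega
    have hQstop' : G arr Q.toNat ≤ G arr (Q.toNat - 1) := hQstop.resolve_left (by omega)
    rw [if_neg hP]
    -- the filter list of B
    have hfirst : (PySem.List.pyRange 0 P).filter
        (fun i => decide (PySem.List.pyGetD arr i 0 ≥ PySem.List.pyGetD arr (i + 1) 0)) = [] := by
      apply List.filter_eq_nil_iff.mpr
      intro a ha
      rw [PySem.List.mem_pyRange_one] at ha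
      have e1 := pg_eq arr a ha.1
      have e2 := pg_eq arr (a + 1) (by omega)
      have e3 : (a + 1).toNat = a.toNat + 1 := by omega
      have hlt : G arr a.toNat < G arr (a.toNat + 1) := hPasc a.toNat (by omega)
      rw [e1, e2, e3]
      simp only [ge_iff_le, decide_eq_true_eq]
      omega
    have hafter : (PySem.List.pyRange Q ((arr.length : Int) - 1)).filter
        (fun i => decide (PySem.List.pyGetD arr i 0 ≥ PySem.List.pyGetD arr (i + 1) 0)) = [] := by
      apply List.filter_eq_nil_iff.mpr
      intro a ha
      rw [PySem.List.mem_pyRange_one] at ha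
      have e1 := pg_eq arr a (by omega)
      have e2 := pg_eq arr (a + 1) (by omega)
      have e3 : (a + 1).toNat = a.toNat + 1 := by omega
      have hlt : G arr (a.toNat + 1 - 1) < G arr (a.toNat + 1) := hQasc (a.toNat + 1) (by omega) (by omega)
      simp only [Nat.add_sub_cancel] at hlt
      rw [e1, e2, e3]
      simp only [ge_iff_le, decide_eq_true_eq]
      omega
    have hpredP : (decide (PySem.List.pyGetD arr P 0 ≥ PySem.List.pyGetD arr (P + 1) 0)) = true := by
      have e1 := pg_eq arr P hP0
      have e2 := pg_eq arr (P + 1) (by omega)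
      have e3 : (P + 1).toNat = P.toNat + 1 := by omega
      rw [e1, e2, e3]
      simp only [ge_iff_le, decide_eq_true_eq]
      omega
    have hpredQ : (decide (PySem.List.pyGetD arr (Q - 1) 0 ≥ PySem.List.pyGetD arr (Q - 1 + 1) 0)) = true := by
      have e1 := pg_eq arr (Q - 1) (by omega)
      have e2 : Q - 1 + 1 = Q := by ring
      have e3 := pg_eq arr Q hQ0
      have e4 : (Q - 1).toNat = Q.toNat - 1 := by omega
      rw [e2, e1, e3, e4]
      simp only [ge_iff_le, decide_eq_true_eq]
      omega
    set desc := (PySem.List.pyRange 0 ((arr.length : Int) - 1)).filter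
        (fun i => decide (PySem.List.pyGetD arr i 0 ≥ PySem.List.pyGetD arr (i + 1) 0)) with hdescdef
    have hdesc1 : desc = P :: (PySem.List.pyRange (P + 1) ((arr.length : Int) - 1)).filter
        (fun i => decide (PySem.List.pyGetD arr i 0 ≥ PySem.List.pyGetD arr (i + 1) 0)) := by
      rw [hdescdef, PySem.List.pyRange_one_append 0 P ((arr.length : Int) - 1) hP0 (by omega),
        List.filter_append, hfirst, PySem.List.pyRange_one_cons hPlt, List.filter_cons, hpredP]
      simp
    have hdesc2 : desc = ((PySem.List.pyRange 0 (Q - 1)).filter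
        (fun i => decide (PySem.List.pyGetD arr i 0 ≥ PySem.List.pyGetD arr (i + 1) 0))) ++ [Q - 1] := by
      rw [hdescdef, PySem.List.pyRange_one_append 0 Q ((arr.length : Int) - 1) (by omega) (by omega),
        List.filter_append, hafter, List.append_nil,
        PySem.List.pyRange_one_append 0 (Q - 1) Q (by omega) (by omega), List.filter_append]
      have hsing : PySem.List.pyRange (Q - 1) Q = [Q - 1] := by
        have e : Q - 1 + 1 = Q := by ring
        have h := PySem.List.pyRange_one_singleton (Q - 1)
        rw [e] at h
        exact h
      rw [hsing, List.filter_cons, hpredQ]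
      simp
    have hdne : desc ≠ [] := by rw [hdesc1]; simp
    rw [if_neg hdne]
    have hp0v : PySem.List.pyGetD desc 0 0 = P := by
      rw [hdesc1]; exact PySem.List.pyGetD_zero_cons _ _ _
    have hpm1v : PySem.List.pyGetD desc (-1) 0 = Q - 1 := by
      rw [hdesc2]; exact PySem.List.pyGetD_neg_one_append_singleton _ _ _
    rw [hp0v, hpm1v]
    have hq : Q - 1 + 1 = Q := by ring
    rw [hq]
    -- the window of values
    have hkk : 1 ≤ Q.toNat + 1 - P.toNat := by omega
    have hjk : P.toNat + (Q.toNat + 1 - P.toNat) ≤ arr.length := by omega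
    have hmapw : (PySem.List.pyRange P (Q + 1)).map (fun i => PySem.List.pyGetD arr i 0)
        = (arr.drop P.toNat).take (Q.toNat + 1 - P.toNat) := by
      have h := map_pyRange_window arr P.toNat (Q.toNat + 1 - P.toNat)
      rw [← drop_take_eq_map_range arr (Q.toNat + 1 - P.toNat) P.toNat hjk] at h
      have harg2 : ((P.toNat : Nat) : Int) + (((Q.toNat + 1 - P.toNat : Nat)) : Int) = Q + 1 := by
        push_cast; omega
      rw [harg2] at h
      have harg1 : ((P.toNat : Nat) : Int) = P := by omega
      rw [harg1] at h
      exact h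
    have hslicew : PySem.List.slice arr (some P) (some (Q + 1))
        = (arr.drop P.toNat).take (Q.toNat + 1 - P.toNat) := by
      rw [PySem.List.slice_toNat arr hP0 (by omega)]
      congr 1
      omega
    set w := (arr.drop P.toNat).take (Q.toNat + 1 - P.toNat) with hwdef
    have hwlen : w.length = Q.toNat + 1 - P.toNat := by
      rw [hwdef]
      simp only [List.length_take, List.length_drop]
      omega
    obtain ⟨x, t, hxt⟩ : ∃ x t, w = x :: t := by
      cases hw : w with
      | nil => rw [hw] at hwlen; simp at hwlen; omega
      | cons x t => exact ⟨x, t, rfl⟩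
    -- A's min/max fold equals B's min/max of the window
    rw [PySem.List.foldl_prod_mk (fun s i => minOptA s (PySem.List.pyGetD arr i 0))
      (fun s i => maxOptA s (PySem.List.pyGetD arr i 0)) (PySem.List.pyRange P (Q + 1)) none none]
    have hfoldmin : (PySem.List.pyRange P (Q + 1)).foldl
        (fun s i => minOptA s (PySem.List.pyGetD arr i 0)) none = some (t.foldl min x) := by
      rw [← List.foldl_map, hmapw, hxt]
      simp only [List.foldl_cons, minOptA]
      exact minOpt_go t x
    have hfoldmax : (PySem.List.pyRange P (Q + 1)).foldl
        (fun s i => maxOptA s (PySem.List.pyGetD arr i 0)) none = some (t.foldl max x) := by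
      rw [← List.foldl_map, hmapw, hxt]
      simp only [List.foldl_cons, maxOptA]
      exact maxOpt_go t x
    rw [hfoldmin, hfoldmax, hslicew, hxt]
    simp only [PySem.List.min?_id_cons, PySem.List.max?_id_cons, Option.getD_some]
    set m := t.foldl min x with hmdef
    set M := t.foldl max x with hMdef
    -- expansions
    have hELS := expandLeft_spec arr m P (by omega)
    set ws2 := expandLeftA arr (some m) P with hws2def
    obtain ⟨hws2lb, hws2ub, hws2mid, hws2stop⟩ := hELS
    have hERS := expandRight_spec arr M Q hQ0 (by omega)
    set we2 := expandRightA arr (some M) Q with hwe2def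
    obtain ⟨hwe2lb, hwe2ub, hwe2mid, hwe2stop⟩ := hERS
    -- left count
    have hleft : ((PySem.List.slice arr none (some (P + 1))).countP (fun x => decide (x ≤ m)) : Int)
        = ws2 + 1 := by
      rw [PySem.List.slice_to arr (by omega : (0:Int) ≤ P + 1)]
      have htake := drop_take_eq_map_range arr (P + 1).toNat 0 (by omega)
      rw [List.drop_zero] at htake
      rw [htake, List.countP_map]
      have hcnt : (List.range (P + 1).toNat).countP
          ((fun x => decide (x ≤ m)) ∘ (fun i => G arr (0 + i))) = (ws2 + 1).toNat := by
        apply countP_range_init _ _ _ (by omega)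
        intro i hi
        simp only [Function.comp, Nat.zero_add, decide_eq_true_eq]
        constructor
        · intro hle
          by_contra hc
          have hgt : m < G arr i := hws2mid i (by omega) (by omega)
          omega
        · intro hit
          have hws20 : 0 ≤ ws2 := by omega
          have hchain := chain_mono arr 0 P.toNat
            (by intro a _ ha2; exact hPasc a (by omega)) i ws2.toNat (Nat.zero_le _) (by omega) (by omega)
          have hlast : G arr ws2.toNat ≤ m := hws2stop.resolve_left (by omega)
          omega
      rw [hcnt]
      omega
    -- right count
    have hright : ((PySem.List.slice arr (some Q) none).countP (fun x => decide (x < M)) : Int)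
        = we2 - Q := by
      rw [PySem.List.slice_from arr hQ0]
      have hdrop : arr.drop Q.toNat = (List.range (arr.length - Q.toNat)).map
          (fun i => G arr (Q.toNat + i)) := by
        have h := drop_take_eq_map_range arr (arr.length - Q.toNat) Q.toNat (by omega)
        rw [← h]
        exact (List.take_of_length_le (by simp)).symm
      rw [hdrop, List.countP_map]
      have hcnt : (List.range (arr.length - Q.toNat)).countP
          ((fun x => decide (x < M)) ∘ (fun i => G arr (Q.toNat + i))) = (we2 - Q).toNat := by
        apply countP_range_init _ _ _ (by omega)
        intro i hi
        simp only [Function.comp, decide_eq_true_eq]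
        constructor
        · intro hlt
          by_contra hc
          rcases hwe2stop with hn | hM
          · omega
          · have hchain := chain_mono arr Q.toNat (arr.length - 1)
              (by intro a ha1 ha2
                  have := hQasc (a + 1) (by omega) (by omega)
                  simpa using this)
              we2.toNat (Q.toNat + i) (by omega) (by omega) (by omega)
            omega
        · intro hit
          exact hwe2mid (Q.toNat + i) (by omega) (by omega)
      rw [hcnt]
      omega
    omega

-- ===== VERDICT (by name: the statement is the Claim_ definition above) =====
theorem minSubArrayWindowToMaketheWholeArraySorted_spec : Claim_equal_minSubArrayWindowToMaketheWholeArraySorted := by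
  intro arr _ hpre
  exact main_eq arr hpre

@[simp] theorem minSubArrayWindowToMaketheWholeArraySorted_raises : Claim_raises_minSubArrayWindowToMaketheWholeArraySorted := by
  unfold Claim_raises_minSubArrayWindowToMaketheWholeArraySorted
  exact ⟨fun arr _ hr hp => hp hr, by decide⟩
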